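-- pv_equiv track=rewrite | github.com/anandevo13/Assignments | 7. Strings/Q11.py | countPattern
-- ===== SOURCE A (Python) =====
-- def countPattern(s):
--     length = len(s)
--     oneSeen = False
--     # Initialize result
--     count = 0
--     for i in range(length):
--         # check if encountered '1' forms a valid pattern is specified
--         if (s[i] == '1' and oneSeen):
--             if (s[i-1] == '0'):
--                 count += 1
--
--         # if 1 encountered for first time set oneSeen to 1
--         if (s[i] == '1' and oneSeen == 0):
--             oneSeen = True
--
--         # Check if there is any other character other than '0' or '1'. If so then set oneSeen to 0 to
--         # search again for new pattern
--         if (s[i] != '0' and s[i] != '1'):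
--             oneSeen = False
--
--     return count
-- ===== SOURCE B (Python) =====
-- def countPattern(s):
--     # Group s into maximal runs of '0'/'1' characters, then score each run:
--     # drop its leading zeros and count adjacent "01" pairs in the remainder
--     # (the pair closing the run's first '1' has its '0' among the dropped
--     # leading zeros, so it is never counted -- matching the spec).
--     runs = []
--     cur = []
--     for c in s:
--         if c == '0' or c == '1':
--             cur.append(c)
--         else:
--             runs.append(cur)
--             cur = []
--     runs.append(cur)
--     total = 0
--     for seg in runs:
--         tail = ''.join(seg).lstrip('0')
--         total += sum(1 for a, b in zip(tail, tail[1:]) if a == '0' and b == '1')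
--     return total
-- ===== Notes on version B (the rewrite author's own statement) =====
-- stated objective: alternative
-- what changed: Replaces A's per-character oneSeen state machine with a two-phase decomposition: group the string into maximal runs of '0'/'1', then score each run by stripping its leading zeros and counting adjacent "01" pairs in the remainder (the pair closing the run's first '1' is excluded because its '0' is among the stripped leading zeros).
import Mathlib
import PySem

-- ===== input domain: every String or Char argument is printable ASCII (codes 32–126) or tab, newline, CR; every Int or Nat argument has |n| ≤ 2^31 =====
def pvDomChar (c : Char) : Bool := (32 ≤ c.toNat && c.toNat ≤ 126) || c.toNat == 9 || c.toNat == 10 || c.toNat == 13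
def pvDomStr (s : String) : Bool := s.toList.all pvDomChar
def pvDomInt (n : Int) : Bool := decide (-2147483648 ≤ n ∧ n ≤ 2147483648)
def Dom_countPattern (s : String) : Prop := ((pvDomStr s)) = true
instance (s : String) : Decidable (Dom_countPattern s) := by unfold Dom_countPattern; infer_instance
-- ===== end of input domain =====

-- B replaces A's per-character oneSeen state machine by grouping the string into maximal
-- '0'/'1' runs and scoring each run via lstrip('0') + adjacent-pair counting (alternative
-- decomposition; not claimed faster).

-- ===== PORT A =====
-- Loop body of A's 'for i in range(length)'.  s[i] and s[i-1] are always in range in this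
-- loop (0 ≤ i < len, and s[i-1] at i = 0 is s[-1], valid because the loop runs only when
-- len ≥ 1), so pyGetD's default is never used.
def countPatternBody (cs : List Char) (st : Bool × Int) (i : Int) : Bool × Int :=
  let oneSeen := st.1
  let count := st.2
  let count :=
    if PySem.List.pyGetD cs i ' ' == '1' && oneSeen then
      if PySem.List.pyGetD cs (i - 1) ' ' == '0' then count + 1 else count
    else count
  let oneSeen :=
    if PySem.List.pyGetD cs i ' ' == '1' && !oneSeen then true else oneSeen
  let oneSeen :=
    if PySem.List.pyGetD cs i ' ' != '0' && PySem.List.pyGetD cs i ' ' != '1' then false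
    else oneSeen
  (oneSeen, count)

def countPattern (s : String) : Int :=
  let length := PySem.Str.len s
  ((PySem.List.pyRange 0 length 1).foldl (countPatternBody s.toList) (false, (0 : Int))).2

-- ===== PORT B =====
-- 'for c in s': append c to cur if c is '0' or '1', else flush cur into runs.
def altGroupStep (st : List (List Char) × List Char) (c : Char) : List (List Char) × List Char :=
  if c == '0' || c == '1' then (st.1, st.2 ++ [c]) else (st.1 ++ [st.2], ([] : List Char))

-- tail = ''.join(seg).lstrip('0') — hand port, exact here: drop the leading '0'
-- characters; then sum(1 for a, b in zip(tail, tail[1:]) if a == '0' and b == '1').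
def altSegScore (seg : List Char) : Int :=
  let tail := seg.dropWhile (fun c => c == '0')
  (((tail.zip (PySem.List.slice tail (some 1) none)).countP
      (fun p => p.1 == '0' && p.2 == '1') : Nat) : Int)

def countPattern_alt (s : String) : Int :=
  let rc := s.toList.foldl altGroupStep ([], [])
  let runs := rc.1 ++ [rc.2]
  runs.foldl (fun total seg => total + altSegScore seg) 0

-- ===== PRECONDITION & SPEC =====
def Spec_countPattern (s : String) (out : Int) : Prop := out = countPattern_alt s
instance (s : String) (out : Int) : Decidable (Spec_countPattern s out) := by unfold Spec_countPattern; infer_instance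

-- ===== CLAIM (what is proved, stated in full; the proofs are below) =====
def Claim_equal_countPattern : Prop := ∀ (s : String), Dom_countPattern s → Spec_countPattern s (countPattern s)

-- ===== LEMMAS AND PROOFS =====

-- A's oneSeen update (second and third 'if' of the loop body) as one function.
def nextSeen (c : Char) (seen : Bool) : Bool :=
  if !(c == '0' || c == '1') then false else (seen || c == '1')

-- A's loop as structural recursion over the characters: the count added from some point
-- on, given the current flag and the previous character.
def loopA : List Char → Bool → Char → Int
  | [], _, _ => 0
  | c :: t, seen, prev =>
      (if c == '1' && seen && prev == '0' then 1 else 0) + loopA t (nextSeen c seen) c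

-- final value of A's flag
def seenA : List Char → Bool → Bool
  | [], seen => seen
  | c :: t, seen => seenA t (nextSeen c seen)

-- adjacent-"01" pair count, structurally
def pairsR : List Char → Int
  | [] => 0
  | [_] => 0
  | a :: b :: t => (if a == '0' && b == '1' then 1 else 0) + pairsR (b :: t)

lemma loopA_false_prev (t : List Char) (p q : Char) :
    loopA t false p = loopA t false q := by
  cases t <;> simp [loopA]

lemma pairsR_zip (t : List Char) :
    (((t.zip (t.drop 1)).countP (fun p => p.1 == '0' && p.2 == '1') : Nat) : Int)
      = pairsR t := by
  match t with
  | [] => simp [pairsR]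
  | [a] => simp [pairsR]
  | a :: b :: u =>
    have ih := pairsR_zip (b :: u)
    simp only [List.drop_succ_cons, List.drop_zero, List.zip_cons_cons, List.countP_cons] at *
    rw [pairsR]
    push_cast at *
    split_ifs at * <;> omega

lemma altSegScore_eq (seg : List Char) :
    altSegScore seg = pairsR (seg.dropWhile (fun c => c == '0')) := by
  show ((((seg.dropWhile (fun c => c == '0')).zip
      (PySem.List.slice (seg.dropWhile (fun c => c == '0')) (some 1) none)).countP
      (fun p => p.1 == '0' && p.2 == '1') : Nat) : Int) = _
  rw [PySem.List.slice_from _ (by norm_num)]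
  exact pairsR_zip _

lemma altSegScore_nil : altSegScore [] = 0 := by decide

lemma pairsR_append_one (t : List Char) (c : Char) :
    pairsR (t ++ [c])
      = pairsR t + (if !t.isEmpty && (t.getLastD ' ' == '0' && c == '1') then 1 else 0) := by
  match t with
  | [] => simp [pairsR]
  | [a] => simp [pairsR]
  | a :: b :: u =>
    have ih := pairsR_append_one (b :: u) c
    simp only [List.cons_append, List.isEmpty_cons, List.getLastD_cons] at *
    rw [pairsR, pairsR]
    omega

lemma getLastD_append_right (l₁ l₂ : List Char) (d : Char) (h : l₂ ≠ []) :
    (l₁ ++ l₂).getLastD d = l₂.getLastD d := by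
  rw [List.getLastD_eq_getLast?, List.getLastD_eq_getLast?,
    List.getLast?_append_of_ne_nil l₁ h]

lemma score_append (cur : List Char) (c : Char)
    (hall : ∀ x ∈ cur, (x == '0' || x == '1') = true)
    (hc : (c == '0' || c == '1') = true) :
    altSegScore (cur ++ [c])
      = altSegScore cur
        + (if c == '1' && cur.contains '1' && cur.getLastD ' ' == '0' then 1 else 0) := by
  rw [altSegScore_eq, altSegScore_eq]
  by_cases hcont : '1' ∈ cur
  · have hdw : cur.dropWhile (fun c => c == '0') ≠ [] := by
      intro hnil
      rw [List.dropWhile_eq_nil_iff] at hnil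
      have := hnil '1' hcont
      simp at this
    rw [List.dropWhile_append]
    simp only [List.isEmpty_iff, if_neg hdw]
    rw [pairsR_append_one]
    have hlast : (cur.dropWhile (fun c => c == '0')).getLastD ' ' = cur.getLastD ' ' := by
      conv_rhs => rw [← List.takeWhile_append_dropWhile (p := fun c => c == '0') (l := cur)]
      rw [getLastD_append_right _ _ _ hdw]
    have hcont' : cur.contains '1' = true := by simpa using hcont
    simp only [hlast, hcont']
    congr 1
    simp only [Bool.and_true]
    by_cases h1 : c == '1' <;> by_cases h0 : cur.getLastD ' ' == '0' <;> simp [h1, h0, hdw]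
  · -- no '1' in cur: every character of cur is '0', so dropWhile gives []
    have hdw : cur.dropWhile (fun c => c == '0') = [] := by
      rw [List.dropWhile_eq_nil_iff]
      intro x hx
      have := hall x hx
      rcases Bool.or_eq_true_iff.mp this with h | h
      · exact h
      · exfalso; exact hcont (by simpa using (beq_iff_eq.mp h ▸ hx))
    have hcont' : cur.contains '1' = false := by simpa using hcont
    rw [List.dropWhile_append, hdw]
    simp only [List.isEmpty_nil, hcont']
    rcases Bool.or_eq_true_iff.mp hc with h | h
    · simp [List.dropWhile, beq_iff_eq.mp h, pairsR]
    · rw [beq_iff_eq.mp h]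
      simp [List.dropWhile, pairsR]

lemma group_factor (l : List Char) : ∀ (rs : List (List Char)) (cur : List Char),
    l.foldl altGroupStep (rs, cur)
      = (rs ++ (l.foldl altGroupStep ([], cur)).1, (l.foldl altGroupStep ([], cur)).2) := by
  induction l with
  | nil => intro rs cur; simp
  | cons c t ih =>
    intro rs cur
    simp only [List.foldl_cons]
    by_cases h : (c == '0' || c == '1') = true
    · simp only [altGroupStep, if_pos h]
      exact ih rs (cur ++ [c])
    · simp only [altGroupStep, if_neg h, List.nil_append]
      rw [ih (rs ++ [cur]) [], ih [cur] []]
      simp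

lemma group_spec (rest : List Char) :
    ∀ (cur : List Char), (∀ x ∈ cur, (x == '0' || x == '1') = true) →
    ((((rest.foldl altGroupStep ([], cur)).1 ++ [(rest.foldl altGroupStep ([], cur)).2]).map
        altSegScore).sum)
      = altSegScore cur + loopA rest (cur.contains '1') (cur.getLastD ' ') := by
  induction rest with
  | nil => intro cur hall; simp [loopA]
  | cons c t ih =>
    intro cur hall
    simp only [List.foldl_cons]
    by_cases h : (c == '0' || c == '1') = true
    · simp only [altGroupStep, if_pos h]
      have hall' : ∀ x ∈ cur ++ [c], (x == '0' || x == '1') = true := by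
        intro x hx
        rcases List.mem_append.mp hx with hx | hx
        · exact hall x hx
        · simp only [List.mem_singleton] at hx; exact hx ▸ h
      rw [ih (cur ++ [c]) hall']
      rw [score_append cur c hall h, loopA]
      have h1 : (cur ++ [c]).contains '1' = (cur.contains '1' || c == '1') := by
        cases hh : c == '1'
        · simp [hh]
          intro hcc; rw [hcc] at hh; simp at hh
        · simp [hh, beq_iff_eq.mp hh]
      have h2 : (cur ++ [c]).getLastD ' ' = c := by simp
      have h3 : nextSeen c (cur.contains '1') = (cur.contains '1' || c == '1') := by
        simp [nextSeen, h]
      rw [h1, h2, h3]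
      ring
    · simp only [altGroupStep, if_neg h, List.nil_append]
      rw [group_factor t [cur] []]
      have hc1 : (c == '1') = false := by
        cases hh : c == '1'
        · rfl
        · exact absurd (by simp [hh]) h
      have := ih [] (by intro x hx; simp at hx)
      simp only [List.contains_nil, List.getLastD_nil] at this
      simp only [List.cons_append, List.map_cons, List.sum_cons, List.nil_append] at *
      rw [this, loopA]
      have h3 : nextSeen c (cur.contains '1') = false := by simp [nextSeen, h]
      rw [h3, altSegScore_nil, loopA_false_prev t c ' ']
      simp [hc1]

lemma rangeFold_eq (rest : List Char) :
    ∀ (pre : List Char) (seen : Bool) (cnt : Int), (seen = true → pre ≠ []) →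
    (PySem.List.pyRange (pre.length : Int) (((pre ++ rest).length : Nat) : Int) 1).foldl
        (countPatternBody (pre ++ rest)) (seen, cnt)
      = (seenA rest seen, cnt + loopA rest seen (pre.getLastD ' ')) := by
  induction rest with
  | nil =>
    intro pre seen cnt _
    rw [PySem.List.pyRange_one_eq_nil (by simp)]
    simp [seenA, loopA]
  | cons c t ih =>
    intro pre seen cnt hpre
    have hlen : ((pre.length : Int)) < (((pre ++ c :: t).length : Nat) : Int) := by
      simp
    rw [PySem.List.pyRange_one_cons hlen]
    simp only [List.foldl_cons]
    -- the current character
    have hget : PySem.List.pyGetD (pre ++ c :: t) (pre.length : Int) ' ' = c := by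
      rw [PySem.List.pyGetD_natCast]
      simp [List.getD_eq_getElem?_getD]
    -- one step of the loop body is one step of loopA/nextSeen
    have hstep : countPatternBody (pre ++ c :: t) (seen, cnt) (pre.length : Int)
        = (nextSeen c seen,
           cnt + (if c == '1' && seen && pre.getLastD ' ' == '0' then 1 else 0)) := by
      cases hs : seen with
      | false =>
        simp only [countPatternBody, hget, nextSeen, Bool.and_false, Bool.if_false_right]
        cases h1 : c == '1' <;> cases h0 : c == '0' <;> simp [h1, h0] <;> simp_all
      | true =>
        have hpre' : pre ≠ [] := hpre hs
        have hprev : PySem.List.pyGetD (pre ++ c :: t) ((pre.length : Int) - 1) ' '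
            = pre.getLastD ' ' := by
          have hl : 1 ≤ pre.length := List.length_pos_of_ne_nil hpre'
          have : (pre.length : Int) - 1 = ((pre.length - 1 : Nat) : Int) := by
            push_cast [hl]; ring
          rw [this, PySem.List.pyGetD_natCast]
          rw [List.getD_eq_getElem?_getD, List.getElem?_append_left (by omega)]
          rw [List.getLastD_eq_getLast?, List.getLast?_eq_getElem?]
        simp only [countPatternBody, hget, hprev, nextSeen]
        cases h1 : c == '1' <;> cases h0 : c == '0' <;>
          cases hL : pre.getLastD ' ' == '0' <;> simp [h1, h0, hL] <;> simp_all
    rw [hstep]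
    -- recursive step with pre' = pre ++ [c]
    have hre : pre ++ c :: t = (pre ++ [c]) ++ t := by simp
    have hlen2 : (pre.length : Int) + 1 = ((pre ++ [c]).length : Int) := by simp
    rw [hre, hlen2]
    rw [ih (pre ++ [c]) (nextSeen c seen) _ (by intro _; simp)]
    have hlast : (pre ++ [c]).getLastD ' ' = c := by simp
    rw [hlast]
    rw [seenA, loopA]
    ring_nf

lemma countPattern_eq_loopA (s : String) :
    countPattern s = loopA s.toList false ' ' := by
  have h := rangeFold_eq s.toList [] false 0 (by simp)
  simp only [List.nil_append, List.length_nil, Nat.cast_zero, List.getLastD_nil] at h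
  show ((PySem.List.pyRange 0 (PySem.Str.len s) 1).foldl
      (countPatternBody s.toList) (false, (0 : Int))).2 = _
  rw [PySem.Str.len_eq, h]
  simp

lemma countPattern_alt_eq_loopA (s : String) :
    countPattern_alt s = loopA s.toList false ' ' := by
  show (((s.toList.foldl altGroupStep ([], [])).1
      ++ [(s.toList.foldl altGroupStep ([], [])).2]).foldl
      (fun total seg => total + altSegScore seg) 0) = _
  rw [PySem.List.foldl_add]
  have h := group_spec s.toList [] (by intro x hx; simp at hx)
  simp only [List.contains_nil, List.getLastD_nil] at h
  rw [h, altSegScore_nil]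
  ring

-- ===== VERDICT (by name: the statement is the Claim_ definition above) =====
theorem countPattern_spec : Claim_equal_countPattern := by
  intro s _
  unfold Spec_countPattern
  rw [countPattern_eq_loopA, countPattern_alt_eq_loopA]
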